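-- pv_equiv track=rewrite | github.com/darcamo/calculator-game-solver | operations.py | warp
-- ===== SOURCE A (Python) =====
-- def warp(number, enter_idx, exit_idx=0):
--     factor = 10**exit_idx
--     digits = str(number)
--     warped_digits = digits[:-enter_idx]
--     non_warped_digits = digits[-enter_idx:]
--     out = int(non_warped_digits)
--     for warped_digit in warped_digits:
--         out = out + factor * int(warped_digit)
--
--     # Reapply warp recursively until it does not change the result
--     if out != number:
--         out = warp(out, enter_idx, exit_idx)
--
--     return out
-- ===== SOURCE B (Python) =====
-- def warp(number, enter_idx, exit_idx=0):
--     # Pure-arithmetic reformulation (no string slicing or int() re-parsing):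
--     # digit split = divmod by 10**enter_idx, warped-digit sum = divmod-by-10 loop,
--     # and the recursion becomes an iterative fixed-point loop.
--     if enter_idx == 0 or number < 0 or enter_idx >= len(str(number)):
--         return number
--     base = 10 ** enter_idx
--     while True:
--         high, low = divmod(number, base)
--         if high == 0:
--             return number
--         s = 0
--         while high:
--             high, r = divmod(high, 10)
--             s += r
--         out = low + 10 ** exit_idx * s
--         if out == number:
--             return out
--         number = out
-- ===== Notes on version B (the rewrite author's own statement) =====
-- stated objective: faster
-- what changed: A slices str(number) and re-parses the pieces with int() inside a tail recursion; B never builds strings: it extracts the kept low digits with divmod(number, 10**enter_idx), sums the warped digits with an integer divmod-by-10 loop, and iterates this step in a while-True fixed-point loop instead of recursing.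
-- outside the precondition, e.g. on warp(55, -1, 3): A returns 5005, B returns 9000.099999999997
import Mathlib
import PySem

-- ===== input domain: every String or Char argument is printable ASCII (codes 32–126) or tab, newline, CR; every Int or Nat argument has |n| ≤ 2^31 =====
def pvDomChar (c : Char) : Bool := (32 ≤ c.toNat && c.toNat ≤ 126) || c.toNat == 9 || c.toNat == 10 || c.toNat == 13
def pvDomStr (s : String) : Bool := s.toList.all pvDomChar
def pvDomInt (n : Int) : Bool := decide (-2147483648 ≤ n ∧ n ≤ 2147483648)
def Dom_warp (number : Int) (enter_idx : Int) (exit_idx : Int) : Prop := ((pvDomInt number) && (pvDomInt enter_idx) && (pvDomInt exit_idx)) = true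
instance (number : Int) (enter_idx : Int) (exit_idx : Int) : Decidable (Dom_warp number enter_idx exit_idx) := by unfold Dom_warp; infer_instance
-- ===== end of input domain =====

-- B replaces A's string slicing and int() re-parsing by integer divmod arithmetic (mod/div by
-- 10**enter_idx and an integer digit-sum loop) and A's tail recursion by an iterative
-- fixed-point loop (objective: faster — no string conversions; measured faster by the check).

-- ===== PORT A =====
-- one warp step of A: factor/digit-split logic on str(number); none = a ValueError of int()
def warpStep (number enter_idx exit_idx : Int) : Option Int :=
  let factor : Int := 10 ^ exit_idx.toNat   -- Python 10**exit_idx; for exit_idx < 0 (a float in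
                                            -- Python) the value is only ever used on Pre_ inputs
                                            -- with no warped digits, where it is not consumed
  let digits := PySem.Int.toChars number                              -- str(number)
  let warped := PySem.List.slice digits none (some (-enter_idx))      -- digits[:-enter_idx]
  let nonWarped := PySem.List.slice digits (some (-enter_idx)) none   -- digits[-enter_idx:]
  match PySem.Int.ofChars? nonWarped with                             -- int(non_warped_digits)
  | none => none
  | some out0 =>
    -- for warped_digit in warped_digits: out = out + factor * int(warped_digit)
    warped.foldl
      (fun acc c => acc.bind (fun o => (PySem.Int.ofChars? [c]).map (fun d => o + factor * d)))
      (some out0)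

-- totality measure for A's self-recursion (a guard only; on the tested Pre_ runs it always
-- decreases, mirroring the fact that A's recursion reaches its fixed point there)
def warpMeasA (number enter_idx exit_idx : Int) : Nat :=
  if exit_idx < enter_idx then number.toNat
  else 2 * ((Nat.digits 10 number.toNat).drop enter_idx.toNat).sum
       + (if warpStep number enter_idx exit_idx = some number then 0 else 1)

def warp (number : Int) (enter_idx : Int) (exit_idx : Int) : Int :=
  match warpStep number enter_idx exit_idx with
  | none => 0   -- int() raised ValueError: outside Pre_warp
  | some out =>
    if out ≠ number then
      -- out = warp(out, enter_idx, exit_idx)  (guarded for totality; see warpMeasA)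
      if _h : warpMeasA out enter_idx exit_idx < warpMeasA number enter_idx exit_idx
      then warp out enter_idx exit_idx
      else out
    else out
termination_by warpMeasA number enter_idx exit_idx
decreasing_by exact _h

-- ===== PORT B =====
-- B's inner `while high: high, r = divmod(high, 10); s += r`.  B only ever runs it with
-- high > 0 (number ≥ 0 there), where Python's `while high:` test is exactly `0 < high`.
def digitSumGo (high s : Int) : Int :=
  if _h : 0 < high then digitSumGo (PySem.Int.floordiv high 10) (s + PySem.Int.mod high 10)
  else s
termination_by high.toNat
decreasing_by
  rw [PySem.Int.floordiv_eq_ediv_of_pos (by norm_num)]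
  omega

-- the value one iteration of B's outer loop produces from `number` (= `number` itself when the
-- loop would return); used by the totality measure and by the proofs
def altBody (number enter_idx exit_idx : Int) : Int :=
  if PySem.Int.floordiv number (10 ^ enter_idx.toNat) = 0 then number
  else PySem.Int.mod number (10 ^ enter_idx.toNat)
       + 10 ^ exit_idx.toNat * digitSumGo (PySem.Int.floordiv number (10 ^ enter_idx.toNat)) 0

-- totality measure for B's while-loop (same guard role as warpMeasA)
def warpMeasB (number enter_idx exit_idx : Int) : Nat :=
  if exit_idx < enter_idx then number.toNat
  else 2 * ((Nat.digits 10 number.toNat).drop enter_idx.toNat).sum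
       + (if altBody number enter_idx exit_idx = number then 0 else 1)

-- while True: high, low = divmod(number, base); if high == 0: return number; s = …;
--             out = low + 10**exit_idx * s; if out == number: return out; number = out
def warpAltLoop (number enter_idx exit_idx : Int) : Int :=
  match PySem.Int.divmod? number (10 ^ enter_idx.toNat) with
  | none => number   -- unreachable: the divisor 10^enter_idx is never 0
  | some (high, low) =>
    if high = 0 then number
    else
      let out := low + 10 ^ exit_idx.toNat * digitSumGo high 0
      if out = number then out
      else if _h : warpMeasB out enter_idx exit_idx < warpMeasB number enter_idx exit_idx
      then warpAltLoop out enter_idx exit_idx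
      else out
termination_by warpMeasB number enter_idx exit_idx
decreasing_by exact _h

-- if enter_idx == 0 or number < 0 or enter_idx >= len(str(number)): return number
def warp_alt (number : Int) (enter_idx : Int) (exit_idx : Int) : Int :=
  if enter_idx = 0 ∨ number < 0 ∨ ((PySem.Int.toChars number).length : Int) ≤ enter_idx
  then number
  else warpAltLoop number enter_idx exit_idx

-- ===== PRECONDITION & SPEC =====
-- Pre_warp keeps the inputs on which A returns normally: nonnegative number and exit_idx (with any
-- enter_idx ≥ 0), plus the no-warped-digit cases enter_idx = 0 and len(str(number)) ≤ enter_idx,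
-- where A returns number unchanged. Excluded: negative number or negative exit_idx with warped
-- digits present (A's int() eventually raises ValueError on '-' or on a float's digits) and
-- negative enter_idx (the reversed split almost always reaches int('') ValueError; the isolated
-- convergent inputs there are excluded with it — see the cite in the claim).
def Pre_warp (number : Int) (enter_idx : Int) (exit_idx : Int) : Prop :=
  0 ≤ enter_idx ∧
    ((0 ≤ number ∧ 0 ≤ exit_idx) ∨ enter_idx = 0 ∨
      ((PySem.Int.toChars number).length : Int) ≤ enter_idx)
instance (number : Int) (enter_idx : Int) (exit_idx : Int) : Decidable (Pre_warp number enter_idx exit_idx) := by unfold Pre_warp; infer_instance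

def pvWitness_warp : Int × Int × Int := (123, 1, 0)

def Spec_warp (number : Int) (enter_idx : Int) (exit_idx : Int) (out : Int) : Prop := out = warp_alt number enter_idx exit_idx
instance (number : Int) (enter_idx : Int) (exit_idx : Int) (out : Int) : Decidable (Spec_warp number enter_idx exit_idx out) := by unfold Spec_warp; infer_instance

-- ===== CLAIM (what is proved, stated in full; the proofs are below) =====
def Claim_equal_warp : Prop := ∀ (number : Int) (enter_idx : Int) (exit_idx : Int), Dom_warp number enter_idx exit_idx → Pre_warp number enter_idx exit_idx → Spec_warp number enter_idx exit_idx (warp number enter_idx exit_idx)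

-- ===== LEMMAS AND PROOFS =====

-- ---- small character facts ----
theorem digitChar_isDigit {d : Nat} (h : d < 10) : (Nat.digitChar d).isDigit = true := by
  interval_cases d <;> decide

theorem digitChar_not_space {d : Nat} (h : d < 10) :
    PySem.Int.isIntSpace (Nat.digitChar d) = false := by
  interval_cases d <;> decide

theorem digitChar_val {d : Nat} (h : d < 10) : (Nat.digitChar d).toNat - '0'.toNat = d := by
  interval_cases d <;> decide

theorem ofChars?_single_digitChar {d : Nat} (h : d < 10) :
    PySem.Int.ofChars? [Nat.digitChar d] = some (d : Int) := by
  interval_cases d <;> decide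

theorem dropWhile_all_false {l : List Char} {p : Char → Bool} (h : ∀ c ∈ l, p c = false) :
    l.dropWhile p = l := by
  cases l with
  | nil => rfl
  | cons a t => rw [List.dropWhile_cons_of_neg]; simp [h a (by simp)]

-- ---- the int() machine on digit strings ----
-- the value Python's int() gives a most-significant-first digit list
def msbVal (L : List Nat) : Nat := L.foldl (fun a d => a * 10 + d) 0

-- int() of a (possibly zero-padded) string of decimal digit characters
theorem ofChars?_digitChars (L : List Nat) (hL : ∀ d ∈ L, d < 10) (hne : L ≠ []) :
    PySem.Int.ofChars? (L.map Nat.digitChar) = some (msbVal L) := by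
  obtain ⟨d, L', rfl⟩ := List.exists_cons_of_ne_nil hne
  have hd : d < 10 := hL d (by simp)
  have hall : ∀ c ∈ (d :: L').map Nat.digitChar, PySem.Int.isIntSpace c = false := by
    intro c hc
    simp only [List.mem_map] at hc
    obtain ⟨v, hv, rfl⟩ := hc
    exact digitChar_not_space (hL v hv)
  simp only [PySem.Int.ofChars?]
  rw [dropWhile_all_false hall, dropWhile_all_false (fun c hc => hall c (List.mem_reverse.mp hc)),
    List.reverse_reverse]
  split
  · next ds heq =>
      exfalso
      have : d.digitChar = '-' := by
        have := congrArg (fun l => l.head?) heq; simpa using this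
      have h1 := digitChar_isDigit hd
      rw [this] at h1; exact absurd h1 (by decide)
  · next ds heq =>
      exfalso
      have : d.digitChar = '+' := by
        have := congrArg (fun l => l.head?) heq; simpa using this
      have h1 := digitChar_isDigit hd
      rw [this] at h1; exact absurd h1 (by decide)
  · next ds heq =>
      clear ds heq hne hall
      simp only [List.map_cons]
      have hL' : ∀ v ∈ L', v < 10 := fun v hv => hL v (by simp [hv])
      clear hL
      change Option.map _ (Bind.bind (if (Nat.digitChar d).isDigit = true then _ else _) _) = _
      rw [if_pos (digitChar_isDigit hd)]
      simp only [Nat.zero_mul, Nat.zero_add, digitChar_val hd, msbVal, List.foldl_cons]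
      clear hd
      induction L' generalizing d with
      | nil => rfl
      | cons a T ih =>
          have ha : a < 10 := hL' a (by simp)
          simp only [List.map_cons, List.foldl_cons]
          change Option.map _ (Bind.bind (if (Nat.digitChar a).isDigit = true then _ else _) _) = _
          rw [if_pos (digitChar_isDigit ha)]
          simp only [digitChar_val ha]
          exact ih (d * 10 + a) (fun v hv => hL' v (by simp [hv]))

-- int() of '-' followed by digit characters
theorem ofChars?_neg_digitChars (L : List Nat) (hL : ∀ d ∈ L, d < 10) (hne : L ≠ []) :
    PySem.Int.ofChars? ('-' :: L.map Nat.digitChar) = some (-(msbVal L : Int)) := by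
  obtain ⟨d, L', rfl⟩ := List.exists_cons_of_ne_nil hne
  have hd : d < 10 := hL d (by simp)
  have hall2 : ∀ c ∈ '-' :: (d :: L').map Nat.digitChar, PySem.Int.isIntSpace c = false := by
    intro c hc
    rcases List.mem_cons.mp hc with rfl | hc
    · decide
    · simp only [List.mem_map] at hc
      obtain ⟨v, hv, rfl⟩ := hc
      exact digitChar_not_space (hL v hv)
  simp only [PySem.Int.ofChars?]
  rw [dropWhile_all_false hall2, dropWhile_all_false (fun c hc => hall2 c (List.mem_reverse.mp hc)),
      List.reverse_reverse]
  simp only [List.map_cons]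
  have hL' : ∀ v ∈ L', v < 10 := fun v hv => hL v (by simp [hv])
  clear hL hall2 hne
  change Option.map _ (Bind.bind (if (Nat.digitChar d).isDigit = true then _ else _) _) = _
  rw [if_pos (digitChar_isDigit hd)]
  simp only [Nat.zero_mul, Nat.zero_add, digitChar_val hd, msbVal, List.foldl_cons]
  clear hd
  induction L' generalizing d with
  | nil => rfl
  | cons a T ih =>
      have ha : a < 10 := hL' a (by simp)
      simp only [List.map_cons, List.foldl_cons]
      change Option.map _ (Bind.bind (if (Nat.digitChar a).isDigit = true then _ else _) _) = _
      rw [if_pos (digitChar_isDigit ha)]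
      simp only [digitChar_val ha]
      exact ih (d * 10 + a) (fun v hv => hL' v (by simp [hv]))

-- ---- str(n) as canonical digits ----
theorem toDigitsCore_eq (f : Nat) : ∀ n acc, n < f →
    Nat.toDigitsCore 10 f n acc =
      (if n = 0 then ['0'] else ((Nat.digits 10 n).map Nat.digitChar).reverse) ++ acc := by
  induction f with
  | zero => intro n acc h; omega
  | succ f ih =>
    intro n acc h
    rw [Nat.toDigitsCore]
    by_cases h0 : n / 10 = 0
    · rw [if_pos h0]
      by_cases hn : n = 0
      · subst hn; simp; rfl
      · have hlt : n < 10 := by omega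
        rw [if_neg hn, Nat.digits_def' (by norm_num : 1 < 10) (Nat.pos_of_ne_zero hn), h0]
        simp [Nat.mod_eq_of_lt hlt]
    · rw [if_neg h0]
      have hn : n ≠ 0 := by omega
      rw [ih (n / 10) _ (by omega)]
      rw [if_neg h0, if_neg hn,
          Nat.digits_def' (by norm_num : 1 < 10) (Nat.pos_of_ne_zero hn)]
      simp

theorem toDigits_eq (n : Nat) :
    Nat.toDigits 10 n = if n = 0 then ['0'] else ((Nat.digits 10 n).map Nat.digitChar).reverse := by
  rw [Nat.toDigits, toDigitsCore_eq (n + 1) n [] (by omega), List.append_nil]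

theorem msbVal_eq_ofDigits : ∀ (L : List Nat) (a : Nat),
    L.foldl (fun x d => x * 10 + d) a = a * 10 ^ L.length + Nat.ofDigits 10 L.reverse := by
  intro L
  induction L with
  | nil => intro a; simp
  | cons d L ih =>
    intro a
    rw [List.foldl_cons, ih, List.reverse_cons, Nat.ofDigits_append]
    simp [Nat.ofDigits_singleton, pow_succ]
    ring

-- int(str(n)) = n, for every integer n
theorem ofChars?_toDigits (N : Nat) : PySem.Int.ofChars? (Nat.toDigits 10 N) = some (N : Int) := by
  rw [toDigits_eq]
  by_cases hN : N = 0
  · subst hN; decide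
  · rw [if_neg hN, ← List.map_reverse,
        ofChars?_digitChars _ (fun d hd => Nat.digits_lt_base (by norm_num) (List.mem_reverse.mp hd))
          (by simpa using Nat.digits_ne_nil_iff_ne_zero.mpr hN)]
    rw [msbVal, msbVal_eq_ofDigits, List.reverse_reverse]
    simp [Nat.ofDigits_digits]

theorem ofChars?_toChars_self (n : Int) : PySem.Int.ofChars? (PySem.Int.toChars n) = some n := by
  unfold PySem.Int.toChars
  by_cases hn : n < 0
  · rw [if_pos hn]
    have hN : n.natAbs ≠ 0 := by omega
    rw [toDigits_eq, if_neg hN, ← List.map_reverse,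
        ofChars?_neg_digitChars _
          (fun d hd => Nat.digits_lt_base (by norm_num) (List.mem_reverse.mp hd))
          (by simpa using Nat.digits_ne_nil_iff_ne_zero.mpr hN)]
    rw [msbVal, msbVal_eq_ofDigits, List.reverse_reverse]
    simp only [Nat.zero_mul, Nat.zero_add, Nat.ofDigits_digits]
    congr 1
    omega
  · rw [if_neg hn, ofChars?_toDigits]
    congr 1
    omega

-- ---- slices with negative bounds ----
theorem slice_none_negstop {α : Type} (xs : List α) {e : Int} (he : 0 < e) :
    PySem.List.slice xs none (some (-e)) = xs.take (xs.length - e.toNat) := by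
  simp only [PySem.List.slice, PySem.List.clampIdx]
  split_ifs with h1 h2 <;> (try omega) <;> (congr 1; omega)

theorem slice_negstart_none {α : Type} (xs : List α) {e : Int} (he : 0 < e) :
    PySem.List.slice xs (some (-e)) none = xs.drop (xs.length - e.toNat) := by
  simp only [PySem.List.slice, PySem.List.clampIdx]
  split_ifs with h1 h2
  · have h0 : xs.length - e.toNat = 0 := by omega
    simp [h0]
  · rw [List.take_of_length_le (by simp)]
    congr 1
    omega
  · omega

-- ---- A's per-digit accumulation over digit characters ----
theorem foldA_digitChars (W : List Nat) (hW : ∀ d ∈ W, d < 10) (factor o : Int) :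
    (W.map Nat.digitChar).foldl
      (fun acc c => acc.bind (fun o => (PySem.Int.ofChars? [c]).map (fun d => o + factor * d)))
      (some o) = some (o + factor * (W.sum : Int)) := by
  induction W generalizing o with
  | nil => simp
  | cons d W ih =>
    have hd : d < 10 := hW d (by simp)
    simp only [List.map_cons, List.foldl_cons, Option.bind_some,
      ofChars?_single_digitChar hd, Option.map_some]
    rw [ih (fun v hv => hW v (by simp [hv]))]
    congr 1
    push_cast [List.map_cons, List.sum_cons]
    ring

-- ---- B's digit-sum loop ----
theorem digitSumGo_eq (h : Int) (hh : 0 ≤ h) : ∀ s,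
    digitSumGo h s = s + ((Nat.digits 10 h.toNat).sum : Int) := by
  induction hm : h.toNat using Nat.strong_induction_on generalizing h with
  | _ m ih =>
  subst hm
  intro s
  rw [digitSumGo]
  by_cases hp : 0 < h
  · rw [dif_pos hp]
    have hdiv : PySem.Int.floordiv h 10 = h / 10 :=
      PySem.Int.floordiv_eq_ediv_of_pos (by norm_num)
    have hmod : PySem.Int.mod h 10 = h % 10 :=
      PySem.Int.mod_eq_emod_of_pos (by norm_num)
    rw [hdiv, hmod, ih (h / 10).toNat (by omega) (h / 10) (by omega) rfl]

    rw [Nat.digits_def' (by norm_num : 1 < 10) (by omega : 0 < h.toNat)]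
    have h1 : (h / 10).toNat = h.toNat / 10 := by omega
    have h2 : h % 10 = ((h.toNat % 10 : Nat) : Int) := by omega
    rw [h1, h2, List.sum_cons]
    push_cast
    ring
  · rw [dif_neg hp]
    have : h.toNat = 0 := by omega
    simp [this]

theorem digitSumGo_nonneg (h : Int) (hh : 0 ≤ h) : 0 ≤ digitSumGo h 0 := by
  rw [digitSumGo_eq h hh 0]
  positivity

-- ---- the two single steps agree on nonnegative numbers ----
theorem base_cast (e : Int) : (10 : Int) ^ e.toNat = ((10 ^ e.toNat : Nat) : Int) := by push_cast; ring

theorem stepEq (n e x : Int) (hn : 0 ≤ n) (he : 0 < e) :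
    warpStep n e x = some (altBody n e x) := by
  have hfl : PySem.Int.floordiv n (10 ^ e.toNat) = ((n.toNat / 10 ^ e.toNat : Nat) : Int) := by
    rw [base_cast, show n = ((n.toNat : Nat) : Int) by omega, PySem.Int.floordiv_natCast]
    simp
  have hmd : PySem.Int.mod n (10 ^ e.toNat) = ((n.toNat % 10 ^ e.toNat : Nat) : Int) := by
    rw [base_cast, show n = ((n.toNat : Nat) : Int) by omega, PySem.Int.mod_natCast]
    simp
  have hchars : PySem.Int.toChars n = Nat.toDigits 10 n.toNat := by
    unfold PySem.Int.toChars
    rw [if_neg (by omega)]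
  unfold warpStep altBody
  simp only [hchars]
  by_cases hbig : (Nat.toDigits 10 n.toNat).length ≤ e.toNat
  case pos =>
    rw [slice_none_negstop _ he, slice_negstart_none _ he]
    have h0 : (Nat.toDigits 10 n.toNat).length - e.toNat = 0 := by omega
    rw [h0, List.take_zero, List.drop_zero, ofChars?_toDigits]
    have hlt : n.toNat < 10 ^ e.toNat := by
      rcases Nat.eq_zero_or_pos n.toNat with hz | hpos
      · rw [hz]; positivity
      · calc n.toNat < 10 ^ (Nat.digits 10 n.toNat).length :=
              Nat.lt_base_pow_length_digits (by norm_num)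
          _ ≤ 10 ^ e.toNat := by
              apply Nat.pow_le_pow_right (by norm_num)
              rw [toDigits_eq, if_neg (by omega)] at hbig
              simpa using hbig
    have hhigh : PySem.Int.floordiv n (10 ^ e.toNat) = 0 := by
      rw [hfl, Nat.div_eq_of_lt hlt]; rfl
    rw [if_pos hhigh]
    dsimp only
    rw [List.foldl_nil]
    congr 1
    omega
  case neg =>
    have hN : n.toNat ≠ 0 := by
      intro hz
      rw [toDigits_eq, if_pos hz] at hbig
      simp at hbig
      omega
    rw [toDigits_eq, if_neg hN] at hbig ⊢
    set D := Nat.digits 10 n.toNat with hD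
    have hlen : ((D.map Nat.digitChar).reverse).length = D.length := by simp
    have hDlt : ∀ d ∈ D, d < 10 := fun d hd => Nat.digits_lt_base (by norm_num) hd
    have helen : e.toNat < D.length := by
      rw [hlen] at hbig; omega
    rw [slice_none_negstop _ he, slice_negstart_none _ he, hlen]
    have htk : ((D.map Nat.digitChar).reverse).take (D.length - e.toNat)
        = ((D.drop e.toNat).reverse).map Nat.digitChar := by
      rw [List.take_reverse, List.length_map, List.map_reverse, List.map_drop]
      congr 2
      omega
    have hdr : ((D.map Nat.digitChar).reverse).drop (D.length - e.toNat)
        = ((D.take e.toNat).reverse).map Nat.digitChar := by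
      rw [List.drop_reverse, List.length_map, List.map_reverse, List.map_take]
      congr 2
      omega
    rw [htk, hdr]
    have hql : Nat.digits 10 (n.toNat / 10 ^ e.toNat) = D.drop e.toNat := by
      rw [Nat.self_div_pow_eq_ofDigits_drop e.toNat n.toNat (by norm_num), ← hD]
      apply Nat.digits_ofDigits 10 (by norm_num)
      · exact fun l hl => hDlt l (List.mem_of_mem_drop hl)
      · intro hne
        rw [List.getLast_drop]
        exact Nat.getLast_digit_ne_zero 10 hN
    have hq0 : n.toNat / 10 ^ e.toNat ≠ 0 := by
      intro hz
      have h5 := hql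
      rw [hz] at h5
      simp only [Nat.digits_zero] at h5
      have h6 := congrArg List.length h5
      simp at h6
      omega
    have hhigh0 : ¬ PySem.Int.floordiv n (10 ^ e.toNat) = 0 := by
      rw [hfl]
      exact_mod_cast hq0
    rw [if_neg hhigh0]
    rw [ofChars?_digitChars _ (fun d hd => hDlt d (List.mem_of_mem_take (List.mem_reverse.mp hd)))
        (by
          intro hcon
          have h7 := congrArg List.length hcon
          simp only [List.length_reverse, List.length_take, List.length_nil] at h7
          omega)]
    simp only [Option.pure_def, Option.bind_eq_bind, Option.bind_some]
    rw [foldA_digitChars _ (fun d hd => hDlt d (List.mem_of_mem_drop (List.mem_reverse.mp hd)))]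
    congr 1
    rw [msbVal, msbVal_eq_ofDigits, List.reverse_reverse,
        ← Nat.self_mod_pow_eq_ofDigits_take e.toNat n.toNat (by norm_num)]
    rw [hmd, digitSumGo_eq _ (by rw [hfl]; positivity) 0]
    have htn : (PySem.Int.floordiv n (10 ^ e.toNat)).toNat = n.toNat / 10 ^ e.toNat := by
      rw [hfl]; norm_cast
    rw [htn, hql, List.sum_reverse]
    push_cast
    ring

theorem altBody_nonneg (n e x : Int) (hn : 0 ≤ n) : 0 ≤ altBody n e x := by
  rw [altBody]
  split_ifs with h
  · exact hn
  · have hb : (0:Int) < 10 ^ e.toNat := by positivity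
    have h1 := PySem.Int.mod_nonneg n hb
    have h2 : 0 ≤ PySem.Int.floordiv n (10 ^ e.toNat) := by
      rw [PySem.Int.floordiv_eq_ediv_of_pos hb]
      exact Int.ediv_nonneg hn (le_of_lt hb)
    have h3 := digitSumGo_nonneg _ h2
    positivity

theorem measEq (n e x : Int) (hn : 0 ≤ n) (he : 0 < e) :
    warpMeasA n e x = warpMeasB n e x := by
  unfold warpMeasA warpMeasB
  rw [stepEq n e x hn he]
  simp

theorem divmod?_of_ne_zero (a b : Int) (hb : b ≠ 0) :
    PySem.Int.divmod? a b = some (PySem.Int.floordiv a b, PySem.Int.mod a b) := by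
  simp [PySem.Int.divmod?, PySem.Int.floordiv, PySem.Int.mod, hb]

-- ---- A's recursion equals B's loop on nonnegative numbers ----
theorem warp_eq_loop (e x : Int) (he : 0 < e) : ∀ (m : Nat) (n : Int), 0 ≤ n →
    warpMeasA n e x = m → warp n e x = warpAltLoop n e x := by
  intro m
  induction m using Nat.strong_induction_on with
  | _ m ih =>
  intro n hn hm
  have hbne : (10 : Int) ^ e.toNat ≠ 0 := by positivity
  rw [warp, warpAltLoop, stepEq n e x hn he, divmod?_of_ne_zero n _ hbne]
  dsimp only
  by_cases hhigh : PySem.Int.floordiv n (10 ^ e.toNat) = 0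
  · have hb : altBody n e x = n := by rw [altBody, if_pos hhigh]
    rw [hb, if_pos hhigh]
    simp
  · have hb : altBody n e x
        = PySem.Int.mod n (10 ^ e.toNat)
          + 10 ^ x.toNat * digitSumGo (PySem.Int.floordiv n (10 ^ e.toNat)) 0 := by
      rw [altBody, if_neg hhigh]
    rw [if_neg hhigh, hb]
    set out := PySem.Int.mod n (10 ^ e.toNat)
        + 10 ^ x.toNat * digitSumGo (PySem.Int.floordiv n (10 ^ e.toNat)) 0 with hodef
    have ho : 0 ≤ out := by
      have := altBody_nonneg n e x hn
      rwa [hb] at this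
    by_cases hout : out = n
    · rw [if_pos hout, hout]
      simp
    · rw [if_neg hout, if_pos (show out ≠ n from hout)]
      rw [measEq out e x ho he, measEq n e x hn he]
      by_cases hg : warpMeasB out e x < warpMeasB n e x
      · rw [dif_pos hg, dif_pos hg]
        refine ih (warpMeasA out e x) ?_ out ho rfl
        rw [measEq out e x ho he]
        rw [measEq n e x hn he] at hm
        omega
      · rw [dif_neg hg, dif_neg hg]

-- ---- the trivial return cases ----
theorem warp_e0 (n x : Int) : warp n 0 x = n := by
  rw [warp]
  unfold warpStep
  simp only [neg_zero]
  rw [PySem.List.slice_to _ (by omega : (0:Int) ≤ 0), PySem.List.slice_from _ (by omega : (0:Int) ≤ 0)]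
  simp only [Int.toNat_zero, List.take_zero, List.drop_zero, ofChars?_toChars_self n,
    List.foldl_nil, ne_eq, not_true_eq_false, if_false]

theorem warp_biglen (n e x : Int) (he : 0 < e)
    (hbig : ((PySem.Int.toChars n).length : Int) ≤ e) : warp n e x = n := by
  rw [warp]
  unfold warpStep
  simp only
  rw [slice_none_negstop _ he, slice_negstart_none _ he]
  have h0 : (PySem.Int.toChars n).length - e.toNat = 0 := by omega
  rw [h0, List.take_zero, List.drop_zero, ofChars?_toChars_self n]
  simp

-- ===== VERDICT (by name: the statement is the Claim_ definition above) =====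
theorem warp_spec : Claim_equal_warp := by
  intro n e x _ hpre
  unfold Spec_warp warp_alt
  obtain ⟨he0, hdisj⟩ := hpre
  by_cases he : e = 0
  · subst he
    rw [if_pos (Or.inl rfl), warp_e0]
  · have hep : 0 < e := by omega
    by_cases hbig : ((PySem.Int.toChars n).length : Int) ≤ e
    · rw [if_pos (Or.inr (Or.inr hbig)), warp_biglen n e x hep hbig]
    · have hn : 0 ≤ n := by
        rcases hdisj with ⟨h1, _⟩ | h2 | h3
        · exact h1
        · exact absurd h2 he
        · exact absurd h3 hbig
      rw [if_neg (by push Not; exact ⟨he, by omega, by omega⟩)]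
      exact warp_eq_loop e x hep (warpMeasA n e x) n hn rfl
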